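-- pv_equiv track=rewrite | github.com/andrewhaisley/argo-dns | test/resolver-test.py | get_section_lines
-- ===== SOURCE A (Python) =====
-- def get_section_lines(lines, tok):
--
--     start = False
--     res = []
--
--     for l in lines:
--         l = l.strip()
--         if start:
--             if l == '':
--                 return res
--             else:
--                 res.append(l)
--         else:
--             if l.find(tok) != -1:
--                 start = True
--
--     return sorted(res)
-- ===== SOURCE B (Python) =====
-- def get_section_lines(lines, tok):
--     stripped = [l.strip() for l in lines]
--     i = next((k for k, l in enumerate(stripped) if l.find(tok) != -1), None)
--     if i is None:
--         return []
--     tail = stripped[i + 1:]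
--     if '' in tail:
--         return tail[:tail.index('')]
--     return sorted(tail)
-- ===== Notes on version B (the rewrite author's own statement) =====
-- stated objective: alternative
-- what changed: Replaces A's single stateful flag-and-accumulator loop with a loop-free index/slice formulation: strip all lines once, locate the token line by index, slice the tail after it, and either cut it at the first blank line (unsorted) or sort the whole tail.
import Mathlib
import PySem

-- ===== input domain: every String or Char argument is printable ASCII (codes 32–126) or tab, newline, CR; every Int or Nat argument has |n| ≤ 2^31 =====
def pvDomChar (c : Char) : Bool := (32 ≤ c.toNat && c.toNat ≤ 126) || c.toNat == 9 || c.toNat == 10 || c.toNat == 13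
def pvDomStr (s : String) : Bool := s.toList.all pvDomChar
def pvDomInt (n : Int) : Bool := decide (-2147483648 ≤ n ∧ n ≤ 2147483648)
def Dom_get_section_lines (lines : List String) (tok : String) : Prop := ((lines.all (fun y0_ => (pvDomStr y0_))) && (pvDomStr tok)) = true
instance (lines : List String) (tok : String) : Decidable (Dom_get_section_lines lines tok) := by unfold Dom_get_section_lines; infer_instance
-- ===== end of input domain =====

-- B replaces A's stateful flag-and-accumulator loop with a loop-free index/slice formulation; same values everywhere.
-- ===== PORT A =====
-- A's single for-loop with state (start, res); list exhausted => sorted(res)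
def pvGoA (tok : String) : List String → Bool → List String → List String
  | [], _, res => PySem.List.sorted res (fun x => x) false
  | l :: rest, start, res =>
    let l := PySem.Str.strip l
    if start then
      if l = "" then res else pvGoA tok rest start (res ++ [l])
    else
      if PySem.Str.find l tok ≠ -1 then pvGoA tok rest true res
      else pvGoA tok rest false res

def get_section_lines (lines : List String) (tok : String) : List String :=
  pvGoA tok lines false []

-- ===== PORT B =====
-- next((k for k, l in enumerate(stripped) if l.find(tok) != -1), None) : index of first token line
def pvFindTok (tok : String) : List String → Option Nat
  | [] => none
  | l :: rest => if PySem.Str.find l tok ≠ -1 then some 0 else (pvFindTok tok rest).map (· + 1)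

def get_section_lines_alt (lines : List String) (tok : String) : List String :=
  match pvFindTok tok (lines.map PySem.Str.strip) with   -- stripped = [l.strip() for l in lines]
  | none => []
  | some i =>
    -- tail = stripped[i+1:] (nonnegative in-range start: exact as drop); '' in tail / tail.index('') / tail[:j]
    match PySem.List.index? ((lines.map PySem.Str.strip).drop (i + 1)) "" with
    | none => PySem.List.sorted ((lines.map PySem.Str.strip).drop (i + 1)) (fun x => x) false
    | some j => ((lines.map PySem.Str.strip).drop (i + 1)).take j

-- ===== PRECONDITION & SPEC =====
def Spec_get_section_lines (lines : List String) (tok : String) (out : List String) : Prop := out = get_section_lines_alt lines tok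
instance (lines : List String) (tok : String) (out : List String) : Decidable (Spec_get_section_lines lines tok out) := by unfold Spec_get_section_lines; infer_instance

-- ===== CLAIM (what is proved, stated in full; the proofs are below) =====
def Claim_equal_get_section_lines : Prop := ∀ (lines : List String) (tok : String), Dom_get_section_lines lines tok → Spec_get_section_lines lines tok (get_section_lines lines tok)

-- ===== LEMMAS AND PROOFS =====
-- once the token is found, A's flagged loop computes B's cut-at-blank-or-sort of the stripped tail
theorem pvGoA_true (tok : String) (s : List String) (res : List String) :
    pvGoA tok s true res =
      match PySem.List.index? (s.map PySem.Str.strip) "" with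
      | none => PySem.List.sorted (res ++ s.map PySem.Str.strip) (fun x => x) false
      | some j => res ++ (s.map PySem.Str.strip).take j := by
  induction s generalizing res with
  | nil => simp [pvGoA, PySem.List.index?]
  | cons a t ih =>
    rw [show pvGoA tok (a :: t) true res
        = (if PySem.Str.strip a = "" then res
           else pvGoA tok t true (res ++ [PySem.Str.strip a])) from rfl]
    rw [List.map_cons]
    by_cases h : PySem.Str.strip a = ""
    · rw [if_pos h, h]
      simp [PySem.List.index?_eq_idxOf?, List.idxOf?_cons]
    · rw [if_neg h, ih, PySem.List.index?_eq_idxOf?, PySem.List.index?_eq_idxOf?, List.idxOf?_cons]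
      simp only [beq_iff_eq, h, if_false]
      cases hj : List.idxOf? "" (t.map PySem.Str.strip) with
      | none => simp
      | some j => simp [List.take_succ_cons]

-- before the token is found, A just scans: equal to B's find-index/slice form
theorem pvGoA_false (tok : String) (lines : List String) :
    pvGoA tok lines false [] = get_section_lines_alt lines tok := by
  induction lines with
  | nil => rfl
  | cons a t ih =>
    rw [show pvGoA tok (a :: t) false []
        = (if PySem.Str.find (PySem.Str.strip a) tok ≠ -1 then pvGoA tok t true []
           else pvGoA tok t false []) from rfl]
    unfold get_section_lines_alt
    rw [List.map_cons,
        show pvFindTok tok (PySem.Str.strip a :: t.map PySem.Str.strip)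
        = (if PySem.Str.find (PySem.Str.strip a) tok ≠ -1 then some 0
           else (pvFindTok tok (t.map PySem.Str.strip)).map (· + 1)) from rfl]
    by_cases h : PySem.Str.find (PySem.Str.strip a) tok ≠ -1
    · rw [if_pos h, if_pos h]
      simp only [List.drop_succ_cons, List.drop_zero]
      rw [pvGoA_true]
      cases PySem.List.index? (t.map PySem.Str.strip) "" <;> simp
    · rw [if_neg h, if_neg h, ih]
      unfold get_section_lines_alt
      cases pvFindTok tok (t.map PySem.Str.strip) <;> simp

-- ===== VERDICT (by name: the statement is the Claim_ definition above) =====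
theorem get_section_lines_spec : Claim_equal_get_section_lines := by
  intro lines tok _
  unfold Spec_get_section_lines get_section_lines
  exact pvGoA_false tok lines
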